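-- pv_equiv track=rewrite | github.com/Darkfirs/pythonTP1 | src/Homework/Homework4/Homework4_Task_1.py | direct_binary_representation
-- ===== SOURCE A (Python) =====
-- def direct_binary_representation(number):
--     bit = []
--     if number == 0:
--         return [0, 0]
--     elif number > 0:
--         sign_bit = [0, 0]
--     else:
--         number = number * (-1)
--         sign_bit = [1, 0]
--     while number > 0:
--         bit.append(number % 2)
--         number = number // 2
--     return sign_bit + bit[::-1]
-- ===== SOURCE B (Python) =====
-- def direct_binary_representation(number):
--     if number == 0:
--         return [0, 0]
--     sign = [0, 0] if number > 0 else [1, 0]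
--     return sign + [int(c) for c in bin(abs(number))[2:]]
-- ===== Notes on version B (the rewrite author's own statement) =====
-- stated objective: idiomatic
-- what changed: Delegates the binary conversion to Python's bin() string formatting and parses its digit characters back to ints, instead of A's manual divmod peel loop followed by a reversal.
import Mathlib
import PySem

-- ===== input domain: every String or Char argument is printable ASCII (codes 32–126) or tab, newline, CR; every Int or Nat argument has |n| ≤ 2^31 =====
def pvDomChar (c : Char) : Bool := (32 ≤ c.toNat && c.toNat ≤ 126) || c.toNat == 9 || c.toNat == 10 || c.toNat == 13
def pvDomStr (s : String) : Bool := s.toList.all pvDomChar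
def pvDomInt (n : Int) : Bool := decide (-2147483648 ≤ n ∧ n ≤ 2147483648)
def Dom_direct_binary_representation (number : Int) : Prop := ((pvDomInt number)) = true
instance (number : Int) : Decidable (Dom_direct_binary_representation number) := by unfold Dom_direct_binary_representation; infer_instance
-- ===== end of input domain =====

-- B delegates the conversion to bin()'s string formatting and parses the digit characters,
-- replacing A's divmod peel loop plus reversal (objective: idiomatic; same cost).

-- ===== PORT A =====
-- the while loop: while number > 0: bit.append(number % 2); number = number // 2
def pvALoop (number : Int) (bit : List Int) : List Int :=
  if h : number > 0 then
    pvALoop (PySem.Int.floordiv number 2) (bit ++ [PySem.Int.mod number 2])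
  else bit
termination_by number.toNat
decreasing_by
  simp [PySem.Int.floordiv, Int.fdiv_eq_ediv]
  omega

def direct_binary_representation (number : Int) : List Int :=
  if number == 0 then [0, 0]
  else
    -- elif/else pick (number, sign_bit); then the shared while loop
    let p : Int × List Int := if number > 0 then (number, [0, 0]) else (number * (-1), [1, 0])
    let bit := pvALoop p.1 []
    -- bit[::-1] is List.reverse
    p.2 ++ bit.reverse

-- ===== PORT B =====
-- hand port of bin(m)'s digit part for m > 0 (MSB-first '0'/'1' characters); exact for Nat m
def pvBinDigits (m : Nat) : List Char :=
  if h : m = 0 then [] else pvBinDigits (m / 2) ++ [if m % 2 = 1 then '1' else '0']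
decreasing_by omega

def direct_binary_representation_alt (number : Int) : List Int :=
  if number = 0 then [0, 0]
  else
    let sign : List Int := if number > 0 then [0, 0] else [1, 0]
    -- bin(abs(number)) = "0b" ++ digits; [2:] drops the "0b" prefix (exact: length ≥ 2)
    let s : List Char := '0' :: 'b' :: pvBinDigits number.natAbs
    -- int(c) on a digit character c is its code minus 48 (exact on '0'/'1')
    sign ++ (s.drop 2).map (fun c => ((c.toNat : Int) - 48))

-- ===== PRECONDITION & SPEC =====
def Spec_direct_binary_representation (number : Int) (out : List Int) : Prop := out = direct_binary_representation_alt number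
instance (number : Int) (out : List Int) : Decidable (Spec_direct_binary_representation number out) := by unfold Spec_direct_binary_representation; infer_instance

-- ===== CLAIM (what is proved, stated in full; the proofs are below) =====
def Claim_equal_direct_binary_representation : Prop := ∀ (number : Int), Dom_direct_binary_representation number → Spec_direct_binary_representation number (direct_binary_representation number)

-- ===== LEMMAS AND PROOFS =====

-- LSB-first bit list of a natural number (characterises A's loop)
def pvLowBits (m : Nat) : List Int :=
  if h : m = 0 then [] else ((m % 2 : Nat) : Int) :: pvLowBits (m / 2)
decreasing_by omega

theorem pvALoop_eq (m : Nat) : ∀ bit : List Int, pvALoop (m : Int) bit = bit ++ pvLowBits m := by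
  induction m using Nat.strong_induction_on with
  | _ m ih =>
    intro bit
    rw [pvALoop.eq_def, pvLowBits.eq_def]
    by_cases h : m = 0
    · simp [h]
    · have hpos : (m : Int) > 0 := by exact_mod_cast Nat.pos_of_ne_zero h
      simp only [hpos, dite_true, h, dite_false]
      have h2 : PySem.Int.floordiv (m : Int) 2 = ((m / 2 : Nat) : Int) := by
        simp [PySem.Int.floordiv, Int.fdiv_eq_ediv]
      have h3 : PySem.Int.mod (m : Int) 2 = ((m % 2 : Nat) : Int) := by
        simp [PySem.Int.mod, Int.fmod_eq_emod]
      rw [h2, h3, ih (m / 2) (by omega)]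
      simp

theorem pvBinDigits_map (m : Nat) :
    (pvBinDigits m).map (fun c => ((c.toNat : Int) - 48)) = (pvLowBits m).reverse := by
  induction m using Nat.strong_induction_on with
  | _ m ih =>
    rw [pvBinDigits.eq_def, pvLowBits.eq_def]
    by_cases h : m = 0
    · simp [h]
    · simp only [h, dite_false]
      rw [List.map_append, ih (m / 2) (by omega), List.reverse_cons]
      congr 1
      rcases Nat.mod_two_eq_zero_or_one m with h2 | h2 <;> simp [h2]

-- ===== VERDICT (by name: the statement is the Claim_ definition above) =====
theorem direct_binary_representation_spec : Claim_equal_direct_binary_representation := by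
  intro number _
  unfold Spec_direct_binary_representation direct_binary_representation direct_binary_representation_alt
  by_cases h0 : number = 0
  · simp [h0]
  · simp only [beq_iff_eq, h0, if_false, List.drop_succ_cons, List.drop_zero]
    by_cases hpos : number > 0
    · simp only [hpos, if_true]
      rw [show number = ((number.natAbs : Nat) : Int) by omega, pvALoop_eq, pvBinDigits_map]
      simp [Int.natAbs_abs]
    · simp only [hpos, if_false]
      rw [show number * (-1) = ((number.natAbs : Nat) : Int) by omega, pvALoop_eq, pvBinDigits_map]
      simp
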